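-- pv_equiv track=rewrite | github.com/technoob05/Stackelberg_Code_Review | src/data_loader.py | _extract_patch_context
-- ===== SOURCE A (Python) =====
-- def _extract_patch_context(patch: str) -> tuple:
--     """
--     Parse a unified diff and extract (old_code, new_code) strings.
--     old_code = context + removed lines (state before the fix — may contain the bug)
--     new_code = context + added lines  (state after the fix — clean)
--     """
--     old_lines, new_lines = [], []
--     for line in patch.splitlines():
--         if line.startswith(("---", "+++")):
--             continue
--         if line.startswith("-"):
--             old_lines.append(line[1:])
--         elif line.startswith("+"):
--             new_lines.append(line[1:])
--         else:
--             ctx = line.lstrip(" ")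
--             old_lines.append(ctx)
--             new_lines.append(ctx)
--     return "\n".join(old_lines), "\n".join(new_lines)
-- ===== SOURCE B (Python) =====
-- def _extract_patch_context(patch: str) -> tuple:
--     """Single character-level scan: finds each line by hand (no splitlines) and
--     appends directly to the two output strings with explicit newline separators
--     (no intermediate lists, no join)."""
--     old = ""
--     new = ""
--     have_old = False
--     have_new = False
--     i = 0
--     n = len(patch)
--     while i < n:
--         j = i
--         while j < n and patch[j] != '\n' and patch[j] != '\r':
--             j += 1
--         line = patch[i:j]
--         if not (line.startswith("---") or line.startswith("+++")):
--             if line.startswith("-"):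
--                 old = old + "\n" + line[1:] if have_old else line[1:]
--                 have_old = True
--             elif line.startswith("+"):
--                 new = new + "\n" + line[1:] if have_new else line[1:]
--                 have_new = True
--             else:
--                 ctx = line.lstrip(" ")
--                 old = old + "\n" + ctx if have_old else ctx
--                 new = new + "\n" + ctx if have_new else ctx
--                 have_old = True
--                 have_new = True
--         if j < n:
--             j += 2 if patch[j] == '\r' and j + 1 < n and patch[j + 1] == '\n' else 1
--         i = j
--     return old, new
-- ===== Notes on version B (the rewrite author's own statement) =====
-- stated objective: alternative
-- what changed: Replaced the splitlines + two accumulator lists + join pipeline by a single character-level scan that locates each line and its terminator by hand and appends directly onto the two output strings with explicit newline separators and have-flags (no intermediate line list, no join).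
import Mathlib
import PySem

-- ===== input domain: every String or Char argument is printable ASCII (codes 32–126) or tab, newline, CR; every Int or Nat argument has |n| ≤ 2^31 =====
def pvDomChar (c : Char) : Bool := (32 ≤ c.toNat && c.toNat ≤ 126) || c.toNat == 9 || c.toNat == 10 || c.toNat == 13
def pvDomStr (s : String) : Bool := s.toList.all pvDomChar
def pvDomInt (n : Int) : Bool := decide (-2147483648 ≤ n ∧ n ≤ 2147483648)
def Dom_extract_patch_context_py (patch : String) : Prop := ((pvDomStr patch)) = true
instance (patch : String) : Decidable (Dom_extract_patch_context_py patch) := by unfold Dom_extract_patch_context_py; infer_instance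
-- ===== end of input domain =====

-- B replaces A's splitlines + two lists + join pipeline by a single character-level
-- scan that finds each line by hand and appends straight onto the two output strings
-- with explicit newline separators; objective: alternative.

-- ===== PORT A =====
-- line.lstrip(" "): drops leading ' ' characters only (exact: explicit chars argument " ")
def pvLstripSp (cs : List Char) : List Char := cs.dropWhile (fun c => c == ' ')

def pvStepA (acc : List String × List String) (line : String) : List String × List String :=
  if PySem.Str.startswith line "---" || PySem.Str.startswith line "+++" then acc
  else if PySem.Str.startswith line "-" then
    (acc.1 ++ [String.ofList (PySem.List.slice line.toList (some 1) none)], acc.2)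
  else if PySem.Str.startswith line "+" then
    (acc.1, acc.2 ++ [String.ofList (PySem.List.slice line.toList (some 1) none)])
  else
    (acc.1 ++ [String.ofList (pvLstripSp line.toList)],
     acc.2 ++ [String.ofList (pvLstripSp line.toList)])

def extract_patch_context_py (patch : String) : String × String :=
  let r := (PySem.Str.splitlines patch).foldl pvStepA ([], [])
  (PySem.Str.join "\n" r.1, PySem.Str.join "\n" r.2)

-- ===== PORT B =====
-- the inner while-scan of B: line = chars up to the first break character
def pvIsNl (c : Char) : Bool := c == '\n' || c == '\r'

def pvLineOf (cs : List Char) : List Char := cs.takeWhile (fun c => !pvIsNl c)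

-- the `j += 2 if '\r\n' else 1` terminator skip on what follows the line
def pvRestOf (cs : List Char) : List Char :=
  match cs.drop (pvLineOf cs).length with
  | '\r' :: '\n' :: r => r
  | _ :: r => r
  | [] => []

-- termination of the outer while loop (cited by pvScanB's decreasing_by)
theorem pvRestOf_lt (cs : List Char) (h : cs ≠ []) : (pvRestOf cs).length < cs.length := by
  have hpos : 0 < cs.length := List.length_pos_of_ne_nil h
  have hd : (cs.drop (pvLineOf cs).length).length ≤ cs.length := by simp
  unfold pvRestOf
  split
  · rename_i r heq; rw [heq] at hd; simp at hd; omega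
  · rename_i c r heq; rw [heq] at hd; simp at hd; omega
  · exact hpos

-- the outer while loop: state = (old, have_old, new, have_new), one line consumed per step
def pvScanB : List Char → List Char → Bool → List Char → Bool → List Char × List Char
  | [], old, _, new, _ => (old, new)
  | c :: cs', old, ho, new, hn =>
    let line := pvLineOf (c :: cs')
    let rest := pvRestOf (c :: cs')
    if PySem.Chars.startswith line ['-','-','-'] || PySem.Chars.startswith line ['+','+','+'] then
      pvScanB rest old ho new hn
    else if PySem.Chars.startswith line ['-'] then
      pvScanB rest
        (if ho then old ++ '\n' :: PySem.List.slice line (some 1) none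
         else PySem.List.slice line (some 1) none) true new hn
    else if PySem.Chars.startswith line ['+'] then
      pvScanB rest old ho
        (if hn then new ++ '\n' :: PySem.List.slice line (some 1) none
         else PySem.List.slice line (some 1) none) true
    else
      pvScanB rest
        (if ho then old ++ '\n' :: pvLstripSp line else pvLstripSp line) true
        (if hn then new ++ '\n' :: pvLstripSp line else pvLstripSp line) true
termination_by cs _ _ _ _ => cs.length
decreasing_by all_goals exact pvRestOf_lt (c :: cs') (by simp)

def extract_patch_context_py_alt (patch : String) : String × String :=
  let r := pvScanB patch.toList [] false [] false
  (String.ofList r.1, String.ofList r.2)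

-- ===== PRECONDITION & SPEC =====
def Spec_extract_patch_context_py (patch : String) (out : String × String) : Prop := out = extract_patch_context_py_alt patch
instance (patch : String) (out : String × String) : Decidable (Spec_extract_patch_context_py patch out) := by unfold Spec_extract_patch_context_py; infer_instance

-- ===== CLAIM (what is proved, stated in full; the proofs are below) =====
def Claim_equal_extract_patch_context_py : Prop := ∀ (patch : String), Dom_extract_patch_context_py patch → Spec_extract_patch_context_py patch (extract_patch_context_py patch)

-- ===== LEMMAS AND PROOFS =====

-- per-line contribution of A's fused loop, per side
def pvOldA (l : List Char) : Option (List Char) :=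
  if PySem.Chars.startswith l ['-','-','-'] || PySem.Chars.startswith l ['+','+','+'] then none
  else if PySem.Chars.startswith l ['-'] then some (PySem.List.slice l (some 1) none)
  else if PySem.Chars.startswith l ['+'] then none
  else some (pvLstripSp l)

def pvNewA (l : List Char) : Option (List Char) :=
  if PySem.Chars.startswith l ['-','-','-'] || PySem.Chars.startswith l ['+','+','+'] then none
  else if PySem.Chars.startswith l ['-'] then none
  else if PySem.Chars.startswith l ['+'] then some (PySem.List.slice l (some 1) none)
  else some (pvLstripSp l)

-- reference line splitter with B's shape (line, then terminator-skipped rest)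
def pvMySplit (cs : List Char) : List (List Char) :=
  match cs with
  | [] => []
  | c :: cs' => pvLineOf (c :: cs') :: pvMySplit (pvRestOf (c :: cs'))
termination_by cs.length
decreasing_by exact pvRestOf_lt (c :: cs') (by simp)

-- B's incremental string building with a have-flag
def pvCombine (a : List Char) (f : Bool) (ps : List (List Char)) : List Char :=
  match ps with
  | [] => a
  | p :: ps => if f then pvCombine (a ++ '\n' :: p) true ps else pvCombine p true ps

theorem pv_go_cons (isB : Char → Bool) (c : Char) (r cur : List Char) (acc : List (List Char))
    (h : c = '\r' → ∀ r', r ≠ '\n'::r') :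
    PySem.Chars.splitlines.go isB (c::r) cur acc =
      (if isB c then PySem.Chars.splitlines.go isB r [] (cur.reverse :: acc)
       else PySem.Chars.splitlines.go isB r (c :: cur) acc) := by
  rw [PySem.Chars.splitlines.go.eq_def]
  split
  · rename_i heq; simp at heq
  · rename_i heq; rw [List.cons.injEq] at heq; exact absurd heq.2 (h heq.1 _)
  · rename_i heq; rw [List.cons.injEq] at heq; obtain ⟨h1, h2⟩ := heq; subst h1; subst h2; rfl

theorem pv_go_eq_aux (n : ℕ) : ∀ (isB : Char → Bool) (cs cur : List Char)
    (acc : List (List Char)), cs.length ≤ n → (∀ c ∈ cs, isB c = pvIsNl c) →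
    PySem.Chars.splitlines.go isB cs cur acc
      = acc.reverse ++ (if cs.isEmpty && cur.isEmpty then []
          else (cur.reverse ++ pvLineOf cs) :: pvMySplit (pvRestOf cs)) := by
  induction n with
  | zero =>
    intro isB cs cur acc hlen hgood
    rw [List.length_eq_zero_iff.mp (Nat.le_zero.mp hlen)]
    rw [PySem.Chars.splitlines.go.eq_def]
    cases cur <;> simp [pvLineOf, pvRestOf, pvMySplit]
  | succ n ih =>
  intro isB cs cur acc hlen hgood
  rcases cs with _ | ⟨c, r⟩
  · rw [PySem.Chars.splitlines.go.eq_def]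
    cases cur <;> simp [pvLineOf, pvRestOf, pvMySplit]
  · by_cases hsh : c = '\r' ∧ ∃ r2, r = '\n' :: r2
    · obtain ⟨hc, r2, hr⟩ := hsh; subst hc; subst hr
      rw [show PySem.Chars.splitlines.go isB ('\r'::'\n'::r2) cur acc
            = PySem.Chars.splitlines.go isB r2 [] (cur.reverse :: acc) from by
          simp only [PySem.Chars.splitlines.go]]
      rw [ih isB r2 [] (cur.reverse :: acc) (by simp at hlen; omega)
            (fun x hx => hgood x (by simp [hx]))]
      have hline : pvLineOf ('\r'::'\n'::r2) = [] := rfl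
      have hrest : pvRestOf ('\r'::'\n'::r2) = r2 := rfl
      rw [hline, hrest]
      cases r2 <;> simp [pvMySplit]
    · rw [pv_go_cons isB c r cur acc (fun hc r2 hr => hsh ⟨hc, r2, hr⟩)]
      have hcm : c ∈ c :: r := by simp
      by_cases hb : isB c = true
      · have hnl : pvIsNl c = true := by rw [← hgood c hcm]; exact hb
        rw [if_pos hb, ih isB r [] (cur.reverse :: acc) (by simp at hlen; omega)
              (fun x hx => hgood x (by simp [hx]))]
        have hline : pvLineOf (c::r) = [] := by simp [pvLineOf, hnl]
        have hrest : pvRestOf (c::r) = r := by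
          unfold pvRestOf
          rw [hline]
          simp only [List.length_nil, List.drop_zero]
          split
          · rename_i r2 heq; rw [List.cons.injEq] at heq
            exact absurd ⟨heq.1, r2, heq.2⟩ hsh
          · rename_i c2 r2 heq; rw [List.cons.injEq] at heq; exact heq.2.symm
          · rename_i heq; simp at heq
        rw [hline, hrest]
        cases r <;> simp [pvMySplit]
      · have hnl : pvIsNl c = false := by rw [← hgood c hcm]; exact Bool.eq_false_iff.mpr hb
        rw [if_neg hb, ih isB r (c :: cur) acc (by simp at hlen; omega)
              (fun x hx => hgood x (by simp [hx]))]
        have hline : pvLineOf (c::r) = c :: pvLineOf r := by simp [pvLineOf, hnl]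
        have hrest : pvRestOf (c::r) = pvRestOf r := by
          unfold pvRestOf
          rw [hline]
          simp only [List.length_cons, List.drop_succ_cons]
        rw [hline, hrest]
        simp

theorem pv_go_eq (isB : Char → Bool) (cs cur : List Char) (acc : List (List Char))
    (hgood : ∀ c ∈ cs, isB c = pvIsNl c) :
    PySem.Chars.splitlines.go isB cs cur acc
      = acc.reverse ++ (if cs.isEmpty && cur.isEmpty then []
          else (cur.reverse ++ pvLineOf cs) :: pvMySplit (pvRestOf cs)) :=
  pv_go_eq_aux cs.length isB cs cur acc le_rfl hgood

-- the line-break predicate PySem.Chars.splitlines closes over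
def pvIsB (c : Char) : Bool :=
  decide (c.toNat = 10) || decide (c.toNat = 13) || decide (c.toNat = 11) || decide (c.toNat = 12) ||
    decide (c.toNat = 28) || decide (c.toNat = 29) || decide (c.toNat = 30) || decide (c.toNat = 133) ||
    decide (c.toNat = 8232) || decide (c.toNat = 8233)

-- on the ASCII/tab/newline/CR domain the only break characters are LF and CR
theorem pv_isB_dom (c : Char) (h : pvDomChar c = true) : pvIsB c = pvIsNl c := by
  have h10 : c.toNat = 10 → c = '\n' := fun hn => Char.ext (UInt32.toNat_inj.mp hn)
  have h13 : c.toNat = 13 → c = '\r' := fun hn => Char.ext (UInt32.toNat_inj.mp hn)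
  have hd : ((32 ≤ c.toNat ∧ c.toNat ≤ 126 ∨ c.toNat = 9) ∨ c.toNat = 10) ∨ c.toNat = 13 := by
    simpa [pvDomChar] using h
  have hd' : 32 ≤ c.toNat ∧ c.toNat ≤ 126 ∨ c.toNat = 9 ∨ c.toNat = 10 ∨ c.toNat = 13 := by tauto
  by_cases ha : c.toNat = 10
  · simp [pvIsB, pvIsNl, h10 ha]
  · by_cases hb : c.toNat = 13
    · simp [pvIsB, pvIsNl, h13 hb]
    · have hnodd : ∀ m : ℕ, m ∈ [11, 12, 28, 29, 30, 133, 8232, 8233] → c.toNat ≠ m := by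
        intro m hm; fin_cases hm <;> (rcases hd' with ⟨h1, h2⟩ | h9 | hA | hB <;> omega)
      have hcn : c ≠ '\n' := fun he => ha (by rw [he]; rfl)
      have hcr : c ≠ '\r' := fun he => hb (by rw [he]; rfl)
      simp [pvIsB, pvIsNl, ha, hb, hcn, hcr,
        hnodd 11 (by simp), hnodd 12 (by simp), hnodd 28 (by simp), hnodd 29 (by simp),
        hnodd 30 (by simp), hnodd 133 (by simp), hnodd 8232 (by simp), hnodd 8233 (by simp)]

theorem pv_splitlines_eq (cs : List Char) (hgood : ∀ c ∈ cs, pvDomChar c = true) :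
    PySem.Chars.splitlines cs = pvMySplit cs := by
  rw [show PySem.Chars.splitlines cs = PySem.Chars.splitlines.go pvIsB cs [] [] from rfl,
      pv_go_eq pvIsB cs [] [] (fun c hc => pv_isB_dom c (hgood c hc))]
  cases cs <;> simp [pvMySplit]

theorem pv_stepA_eq (o n : List String) (s : String) :
    pvStepA (o, n) s = (o ++ ((pvOldA s.toList).map String.ofList).toList,
                        n ++ ((pvNewA s.toList).map String.ofList).toList) := by
  simp only [pvStepA, pvOldA, pvNewA, PySem.Str.startswith_eq,
    show ("-".toList : List Char) = ['-'] from rfl, show ("+".toList : List Char) = ['+'] from rfl,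
    show ("---".toList : List Char) = ['-','-','-'] from rfl,
    show ("+++".toList : List Char) = ['+','+','+'] from rfl]
  split_ifs <;> simp

theorem pv_foldA (L : List (List Char)) (o n : List String) :
    (L.map String.ofList).foldl pvStepA (o, n)
      = (o ++ (L.filterMap pvOldA).map String.ofList,
         n ++ (L.filterMap pvNewA).map String.ofList) := by
  induction L generalizing o n with
  | nil => simp
  | cons l L ih =>
    rw [List.map_cons, List.foldl_cons, pv_stepA_eq, ih, List.filterMap_cons, List.filterMap_cons]
    simp only [String.toList_ofList]
    cases pvOldA l <;> cases pvNewA l <;> simp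

theorem pv_scan_eq_aux (n : ℕ) : ∀ (cs old new : List Char) (ho hn : Bool), cs.length ≤ n →
    pvScanB cs old ho new hn
      = (pvCombine old ho ((pvMySplit cs).filterMap pvOldA),
         pvCombine new hn ((pvMySplit cs).filterMap pvNewA)) := by
  induction n with
  | zero =>
    intro cs old new ho hn hlen
    rw [List.length_eq_zero_iff.mp (Nat.le_zero.mp hlen)]
    simp [pvScanB, pvMySplit, pvCombine]
  | succ n ih =>
  intro cs old new ho hn hlen
  rcases cs with _ | ⟨c, cs'⟩
  · simp [pvScanB, pvMySplit, pvCombine]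
  · have hlen' : (pvRestOf (c :: cs')).length ≤ n := by
      have hlt := pvRestOf_lt (c :: cs') (by simp)
      simp only [List.length_cons] at hlen hlt; omega
    rw [show pvMySplit (c :: cs') = pvLineOf (c :: cs') :: pvMySplit (pvRestOf (c :: cs')) from by
      rw [pvMySplit]]
    simp only [pvScanB]
    by_cases h1 : (PySem.Chars.startswith (pvLineOf (c :: cs')) ['-','-','-']
        || PySem.Chars.startswith (pvLineOf (c :: cs')) ['+','+','+']) = true
    · rw [if_pos h1, List.filterMap_cons_none (by simp [pvOldA, h1]),
          List.filterMap_cons_none (by simp [pvNewA, h1]), ih _ old new ho hn hlen']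
    · rw [if_neg h1]
      by_cases h2 : PySem.Chars.startswith (pvLineOf (c :: cs')) ['-'] = true
      · rw [if_pos h2,
            List.filterMap_cons_some (show pvOldA (pvLineOf (c :: cs'))
                = some (PySem.List.slice (pvLineOf (c :: cs')) (some 1) none) by
              simp [pvOldA, h1, h2]),
            List.filterMap_cons_none (by simp [pvNewA, h1, h2]),
            ih _ _ new _ hn hlen']
        cases ho <;> simp [pvCombine]
      · rw [if_neg h2]
        by_cases h3 : PySem.Chars.startswith (pvLineOf (c :: cs')) ['+'] = true
        · rw [if_pos h3,
              List.filterMap_cons_none (by simp [pvOldA, h1, h2, h3]),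
              List.filterMap_cons_some (show pvNewA (pvLineOf (c :: cs'))
                  = some (PySem.List.slice (pvLineOf (c :: cs')) (some 1) none) by
                simp [pvNewA, h1, h2, h3]),
              ih _ old _ ho _ hlen']
          cases hn <;> simp [pvCombine]
        · rw [if_neg h3,
              List.filterMap_cons_some (show pvOldA (pvLineOf (c :: cs'))
                  = some (pvLstripSp (pvLineOf (c :: cs'))) by simp [pvOldA, h1, h2, h3]),
              List.filterMap_cons_some (show pvNewA (pvLineOf (c :: cs'))
                  = some (pvLstripSp (pvLineOf (c :: cs'))) by simp [pvNewA, h1, h2, h3]),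
              ih _ _ _ _ _ hlen']
          cases ho <;> cases hn <;> simp [pvCombine]

theorem pv_scan_eq (cs old new : List Char) (ho hn : Bool) :
    pvScanB cs old ho new hn
      = (pvCombine old ho ((pvMySplit cs).filterMap pvOldA),
         pvCombine new hn ((pvMySplit cs).filterMap pvNewA)) :=
  pv_scan_eq_aux cs.length cs old new ho hn le_rfl

theorem pv_combine_true (a : List Char) (ps : List (List Char)) :
    pvCombine a true ps = PySem.Chars.join ['\n'] (a :: ps) := by
  induction ps generalizing a with
  | nil => simp [pvCombine, PySem.Chars.join_singleton]
  | cons p ps ih =>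
    rw [pvCombine, if_pos rfl, ih]
    cases ps with
    | nil => simp [PySem.Chars.join_singleton, PySem.Chars.join_cons_cons]
    | cons q ps' => simp [PySem.Chars.join_cons_cons]

theorem pv_combine_false (ps : List (List Char)) :
    pvCombine [] false ps = PySem.Chars.join ['\n'] ps := by
  cases ps with
  | nil => simp [pvCombine, PySem.Chars.join_nil]
  | cons p ps => rw [pvCombine, if_neg (by simp)]; exact pv_combine_true p ps

theorem pv_join_map (L : List (List Char)) :
    PySem.Str.join "\n" (L.map String.ofList) = String.ofList (PySem.Chars.join ['\n'] L) := by
  simp [PySem.Str.join, Function.comp_def]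

-- ===== VERDICT (by name: the statement is the Claim_ definition above) =====
theorem extract_patch_context_py_spec : Claim_equal_extract_patch_context_py := by
  intro patch hdom
  unfold Spec_extract_patch_context_py extract_patch_context_py extract_patch_context_py_alt
  have hgood : ∀ c ∈ patch.toList, pvDomChar c = true := by
    have := hdom; unfold Dom_extract_patch_context_py pvDomStr at this
    simpa [List.all_eq_true] using this
  rw [show PySem.Str.splitlines patch
        = (PySem.Chars.splitlines patch.toList).map String.ofList from rfl,
      pv_splitlines_eq _ hgood, pv_foldA, pv_scan_eq]
  simp only [List.nil_append]
  rw [pv_combine_false, pv_combine_false, pv_join_map, pv_join_map]
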